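-- pv_equiv track=rewrite | github.com/pypi-data/pypi-mirror-89 | packages/scappamento/scappamento-0.3b1.tar.gz/scappamento-0.3b1/scappamento/supplier.py | fix_illegal_sep_quotes
-- ===== SOURCE A (Python) =====
-- def fix_illegal_sep_quotes(line, sep, sep_replacement):
--     is_modified = False
--     in_quotes = False
--     new_line = ''
--     for char in line:
--         if char == '"':
--             in_quotes = not in_quotes  # toggle
--             new_line = new_line + char
--             continue
--
--         if in_quotes and char == sep:
--             new_line = new_line + sep_replacement
--             is_modified = True
--         else:
--             new_line = new_line + char
--
--     return new_line, is_modified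
-- ===== SOURCE B (Python) =====
-- def fix_illegal_sep_quotes(line, sep, sep_replacement):
--     # A character-by-character scan is replaced by split-on-quote: even-indexed
--     # parts lie outside quotes, odd-indexed parts inside; fix only the odd ones.
--     if len(sep) != 1:
--         return line, False
--     parts = line.split('"')
--     modified = False
--     out = []
--     for i, p in enumerate(parts):
--         if i % 2 == 1:
--             if sep in p:
--                 modified = True
--             out.append(p.replace(sep, sep_replacement))
--         else:
--             out.append(p)
--     return '"'.join(out), modified
-- ===== Notes on version B (the rewrite author's own statement) =====
-- stated objective: faster
-- what changed: Instead of a stateful char-by-char scan toggling an in-quotes flag and concatenating one char at a time, B splits the line on the quote character, runs str.replace on the odd-indexed (inside-quote) parts only, and rejoins with quotes; a guard returns the line unchanged when sep is not a single character (where A's char==sep test can never fire).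
import Mathlib
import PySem

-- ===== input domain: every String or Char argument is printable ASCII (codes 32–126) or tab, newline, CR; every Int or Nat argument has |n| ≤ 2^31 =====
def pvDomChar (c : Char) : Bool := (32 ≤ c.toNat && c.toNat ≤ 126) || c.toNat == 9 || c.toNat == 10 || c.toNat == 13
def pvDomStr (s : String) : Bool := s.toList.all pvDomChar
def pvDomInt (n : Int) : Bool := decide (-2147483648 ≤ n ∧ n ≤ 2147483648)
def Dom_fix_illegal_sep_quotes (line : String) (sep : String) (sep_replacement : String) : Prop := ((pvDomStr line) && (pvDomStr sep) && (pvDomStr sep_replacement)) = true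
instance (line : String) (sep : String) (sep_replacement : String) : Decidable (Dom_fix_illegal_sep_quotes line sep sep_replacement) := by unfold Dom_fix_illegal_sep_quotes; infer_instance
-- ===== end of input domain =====

-- B replaces A's stateful char-by-char scan (one string concatenation per char) by split-on-quote / replace in odd parts / rejoin (measured faster in a timing run).

-- ===== PORT A =====
-- state = (is_modified, in_quotes, new_line), exactly A's loop
def fix_illegal_sep_quotes (line : String) (sep : String) (sep_replacement : String) : String × Bool :=
  let r := line.toList.foldl (fun (st : Bool × Bool × List Char) c =>
      if c = '"' then (st.1, !st.2.1, st.2.2 ++ [c])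
      else if st.2.1 && ([c] == sep.toList) then (true, st.2.1, st.2.2 ++ sep_replacement.toList)
      else (st.1, st.2.1, st.2.2 ++ [c])) (false, false, [])
  (String.ofList r.2.2, r.1)

-- ===== PORT B =====
def fix_illegal_sep_quotes_alt (line : String) (sep : String) (sep_replacement : String) : String × Bool :=
  if sep.toList.length ≠ 1 then (line, false) else
  let parts := PySem.Chars.splitOn line.toList ['"']
  let r := (PySem.List.enumerate parts).foldl (fun (st : Bool × List (List Char)) ip =>
      if PySem.Int.mod ip.1 2 = 1 then
        (st.1 || PySem.Chars.isIn sep.toList ip.2,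
         st.2 ++ [PySem.Chars.replace ip.2 sep.toList sep_replacement.toList])
      else (st.1, st.2 ++ [ip.2])) (false, ([] : List (List Char)))
  (String.ofList (PySem.Chars.join ['"'] r.2), r.1)

-- ===== PRECONDITION & SPEC =====
def Spec_fix_illegal_sep_quotes (line : String) (sep : String) (sep_replacement : String) (out : String × Bool) : Prop := out = fix_illegal_sep_quotes_alt line sep sep_replacement
instance (line : String) (sep : String) (sep_replacement : String) (out : String × Bool) : Decidable (Spec_fix_illegal_sep_quotes line sep sep_replacement out) := by unfold Spec_fix_illegal_sep_quotes; infer_instance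

-- ===== CLAIM (what is proved, stated in full; the proofs are below) =====
def Claim_equal_fix_illegal_sep_quotes : Prop := ∀ (line : String) (sep : String) (sep_replacement : String), Dom_fix_illegal_sep_quotes line sep sep_replacement → Spec_fix_illegal_sep_quotes line sep sep_replacement (fix_illegal_sep_quotes line sep sep_replacement)

-- ===== LEMMAS AND PROOFS =====

-- split on '"' as a pure structural recursion
def splitQ : List Char → List (List Char)
  | [] => [[]]
  | c :: t => if c = '"' then [] :: splitQ t else (splitQ t).modifyHead (c :: ·)

-- replace of a single char as a pure structural recursion
def replQ (s : Char) (rep : List Char) : List Char → List Char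
  | [] => []
  | c :: t => if c = s then rep ++ replQ s rep t else c :: replQ s rep t

-- A's loop body, accumulator-free
def procA (sepL rep : List Char) : List Char → Bool → List Char × Bool
  | [], _ => ([], false)
  | c :: t, inq =>
    if c = '"' then
      let r := procA sepL rep t (!inq); ('"' :: r.1, r.2)
    else if inq && ([c] == sepL) then
      let r := procA sepL rep t inq; (rep ++ r.1, true)
    else
      let r := procA sepL rep t inq; (c :: r.1, r.2)

def tglQ : List Char → Bool → Bool
  | [], inq => inq
  | c :: t, inq => tglQ t (if c = '"' then !inq else inq)

def bodyOf (s : Char) (rep : List Char) (inq : Bool) (p : List Char) : List Char :=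
  if inq then replQ s rep p else p

def joinT (s : Char) (rep : List Char) : Bool → List (List Char) → List Char
  | _, [] => []
  | inq, p :: ps => '"' :: bodyOf s rep inq p ++ joinT s rep (!inq) ps

def joinB (s : Char) (rep : List Char) (inq : Bool) : List (List Char) → List Char
  | [] => []
  | p :: ps => bodyOf s rep inq p ++ joinT s rep (!inq) ps

def modB (s : Char) : Bool → List (List Char) → Bool
  | _, [] => false
  | inq, p :: ps => (inq && decide (s ∈ p)) || modB s (!inq) ps

def mapAlt (s : Char) (rep : List Char) : Bool → List (List Char) → List (List Char)
  | _, [] => []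
  | inq, p :: ps => bodyOf s rep inq p :: mapAlt s rep (!inq) ps

theorem splitQ_ne_nil (l : List Char) : splitQ l ≠ [] := by
  cases l with
  | nil => simp [splitQ]
  | cons c t =>
    simp only [splitQ]
    split
    · simp
    · cases h : splitQ t with
      | nil => exact absurd h (splitQ_ne_nil t)
      | cons p ps => simp [List.modifyHead]

theorem splitOn_go_spec : ∀ (l : List Char) (fuel : Nat) (cur : List Char) (acc : List (List Char)),
    l.length ≤ fuel →
    PySem.Chars.splitOn.go ['"'] fuel l cur acc
      = acc.reverse ++ (splitQ l).modifyHead (cur.reverse ++ ·) := by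
  intro l
  induction l with
  | nil =>
    intro fuel cur acc _
    cases fuel <;> simp [PySem.Chars.splitOn.go, splitQ]
  | cons c t ih =>
    intro fuel cur acc hf
    cases fuel with
    | zero => simp at hf
    | succ f =>
      rw [PySem.Chars.splitOn.go]
      by_cases hc : c = '"'
      · subst hc
        simp only [List.isPrefixOf, Bool.and_true, beq_self_eq_true, if_pos]
        show PySem.Chars.splitOn.go ['"'] f t [] (cur.reverse :: acc) = _
        rw [ih f [] (cur.reverse :: acc) (by simpa using Nat.le_of_succ_le_succ hf)]
        simp [splitQ]
        cases h : splitQ t with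
        | nil => exact absurd h (splitQ_ne_nil t)
        | cons p ps => simp [List.modifyHead]
      · have hpre : ([ '"' ].isPrefixOf (c :: t)) = false := by
          simp [List.isPrefixOf]
          intro h; exact absurd h.symm hc
        rw [hpre]
        simp only [Bool.false_eq_true, if_false]
        rw [ih f (c :: cur) acc (by simpa using Nat.le_of_succ_le_succ hf)]
        simp only [splitQ, if_neg hc]
        rw [List.modifyHead_modifyHead]
        simp [Function.comp_def]

theorem splitOn_eq (l : List Char) : PySem.Chars.splitOn l ['"'] = splitQ l := by
  rw [PySem.Chars.splitOn, splitOn_go_spec l (l.length + 1) [] [] (by omega)]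
  cases h : splitQ l with
  | nil => exact absurd h (splitQ_ne_nil l)
  | cons p ps => simp [List.modifyHead]

theorem replace_go_spec (s : Char) (rep : List Char) : ∀ (l : List Char) (fuel : Nat) (acc : List Char),
    l.length ≤ fuel →
    PySem.Chars.replace.go [s] rep fuel l acc = acc.reverse ++ replQ s rep l := by
  intro l
  induction l with
  | nil =>
    intro fuel acc _
    cases fuel <;> simp [PySem.Chars.replace.go, replQ]
  | cons c t ih =>
    intro fuel acc hf
    cases fuel with
    | zero => simp at hf
    | succ f =>
      rw [PySem.Chars.replace.go]
      by_cases hc : c = s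
      · subst hc
        simp only [List.isPrefixOf, Bool.and_true, beq_self_eq_true, if_pos]
        show PySem.Chars.replace.go [c] rep f t (rep.reverse ++ acc) = _
        rw [ih f (rep.reverse ++ acc) (by simpa using Nat.le_of_succ_le_succ hf)]
        simp [replQ]
      · have hpre : ([s].isPrefixOf (c :: t)) = false := by
          simp [List.isPrefixOf]
          intro h; exact absurd h.symm hc
        rw [hpre]
        simp only [Bool.false_eq_true, if_false]
        rw [ih f (c :: acc) (by simpa using Nat.le_of_succ_le_succ hf)]
        simp [replQ, hc]

theorem replace_eq (s : Char) (rep p : List Char) :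
    PySem.Chars.replace p [s] rep = replQ s rep p := by
  rw [PySem.Chars.replace]
  simp only [List.isEmpty_cons, Bool.false_eq_true, if_false]
  rw [replace_go_spec s rep p p.length [] (le_refl _)]
  simp

theorem isIn_singleton (s : Char) (p : List Char) :
    PySem.Chars.isIn [s] p = decide (s ∈ p) := by
  by_cases h : s ∈ p
  · simp [h, (PySem.Chars.isIn_iff_infix [s] p).2 ((List.singleton_infix_iff s p).2 h)]
  · have : PySem.Chars.isIn [s] p ≠ true := fun hh =>
      h ((List.singleton_infix_iff s p).1 ((PySem.Chars.isIn_iff_infix [s] p).1 hh))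
    simp [h, Bool.not_eq_true] at this ⊢
    exact this

theorem foldA_spec (sepL rep : List Char) : ∀ (l : List Char) (im inq : Bool) (nl : List Char),
    l.foldl (fun (st : Bool × Bool × List Char) c =>
      if c = '"' then (st.1, !st.2.1, st.2.2 ++ [c])
      else if st.2.1 && ([c] == sepL) then (true, st.2.1, st.2.2 ++ rep)
      else (st.1, st.2.1, st.2.2 ++ [c])) (im, inq, nl)
    = (im || (procA sepL rep l inq).2, tglQ l inq, nl ++ (procA sepL rep l inq).1) := by
  intro l
  induction l with
  | nil => intro im inq nl; simp [procA, tglQ]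
  | cons c t ih =>
    intro im inq nl
    rw [List.foldl_cons]
    by_cases hc : c = '"'
    · subst hc
      simp only [if_pos]
      rw [ih]
      simp [procA, tglQ]
    · by_cases hm : inq && ([c] == sepL)
      · simp only [if_neg hc, if_pos hm]
        rw [ih]
        simp [procA, hc, hm, tglQ]
      · simp only [if_neg hc, if_neg hm]
        rw [ih]
        simp only [procA, if_neg hc, tglQ]
        rw [if_neg hm]
        simp

theorem procA_of_len_ne_one (sepL rep : List Char) (h : sepL.length ≠ 1) :
    ∀ (l : List Char) (inq : Bool), procA sepL rep l inq = (l, false) := by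
  intro l
  induction l with
  | nil => intro inq; simp [procA]
  | cons c t ih =>
    intro inq
    have hne : ([c] == sepL) = false := by
      rw [beq_eq_false_iff_ne]
      rintro rfl; exact h rfl
    by_cases hc : c = '"'
    · subst hc; simp [procA, ih]
    · simp [procA, hc, hne, ih]

theorem joinT_eq_cons (s : Char) (rep : List Char) (inq : Bool) (ps : List (List Char)) (h : ps ≠ []) :
    joinT s rep inq ps = '"' :: joinB s rep inq ps := by
  cases ps with
  | nil => exact absurd rfl h
  | cons p ps => simp [joinT, joinB]

theorem procA_split (s : Char) (rep : List Char) :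
    ∀ (l : List Char) (inq : Bool),
      procA [s] rep l inq = (joinB s rep inq (splitQ l), modB s inq (splitQ l)) := by
  intro l
  induction l with
  | nil =>
    intro inq
    simp [procA, splitQ, joinB, joinT, modB, bodyOf, replQ]
  | cons c t ih =>
    intro inq
    by_cases hc : c = '"'
    · subst hc
      simp only [procA, splitQ]
      rw [ih]
      obtain ⟨p, ps, hps⟩ : ∃ p ps, splitQ t = p :: ps := by
        cases h : splitQ t with
        | nil => exact absurd h (splitQ_ne_nil t)
        | cons p ps => exact ⟨p, ps, rfl⟩
      rw [hps]
      simp [joinB, joinT, modB, bodyOf, replQ]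
    · obtain ⟨p, ps, hps⟩ : ∃ p ps, splitQ t = p :: ps := by
        cases h : splitQ t with
        | nil => exact absurd h (splitQ_ne_nil t)
        | cons p ps => exact ⟨p, ps, rfl⟩
      simp only [procA, if_neg hc, splitQ, hps, List.modifyHead]
      rw [ih, hps]
      cases inq with
      | false =>
        simp [joinB, modB, bodyOf]
      | true =>
        by_cases hcs : c = s
        · subst hcs
          simp [joinB, modB, bodyOf, replQ]
        · have hm : (true && ([c] == [s])) = false := by simp [hcs]
          rw [hm]
          simp only [Bool.false_eq_true, if_false]
          have hsc : ¬ s = c := fun hh => hcs hh.symm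
          simp [joinB, modB, bodyOf, replQ, hcs, hsc]

theorem join_mapAlt (s : Char) (rep : List Char) :
    ∀ (ps : List (List Char)) (inq : Bool), ps ≠ [] →
      PySem.Chars.join ['"'] (mapAlt s rep inq ps) = joinB s rep inq ps := by
  intro ps
  induction ps with
  | nil => intro inq h; exact absurd rfl h
  | cons p ps ih =>
    intro inq _
    cases ps with
    | nil => simp [mapAlt, PySem.Chars.join_singleton, joinB, joinT]
    | cons q qs =>
      have hj : PySem.Chars.join ['"'] (mapAlt s rep (!inq) (q :: qs)) = joinB s rep (!inq) (q :: qs) :=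
        ih (!inq) (by simp)
      show PySem.Chars.join ['"'] (bodyOf s rep inq p :: mapAlt s rep (!inq) (q :: qs)) = _
      rw [show mapAlt s rep (!inq) (q :: qs) = bodyOf s rep (!inq) q :: mapAlt s rep (!(!inq)) qs from rfl,
          PySem.Chars.join_cons_cons,
          show PySem.Chars.join ['"'] (bodyOf s rep (!inq) q :: mapAlt s rep (!(!inq)) qs) = joinB s rep (!inq) (q :: qs) from hj,
          show joinB s rep inq (p :: q :: qs) = bodyOf s rep inq p ++ joinT s rep (!inq) (q :: qs) from rfl,
          joinT_eq_cons s rep (!inq) (q :: qs) (by simp)]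
      simp

theorem mod2_succ (n : Int) :
    (decide (PySem.Int.mod (n + 1) 2 = 1)) = !(decide (PySem.Int.mod n 2 = 1)) := by
  have h1 : PySem.Int.mod (n + 1) 2 = (n + 1) % 2 := PySem.Int.mod_eq_emod_of_pos (by norm_num)
  have h2 : PySem.Int.mod n 2 = n % 2 := PySem.Int.mod_eq_emod_of_pos (by norm_num)
  rw [h1, h2]
  by_cases h : n % 2 = 1
  · have : (n + 1) % 2 = 0 := by omega
    simp [h, this]
  · have : (n + 1) % 2 = 1 := by omega
    simp [h, this]

theorem foldB_spec (s : Char) (rep : List Char) :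
    ∀ (ps : List (List Char)) (n : Int) (m : Bool) (out : List (List Char)),
      (PySem.List.enumerate ps n).foldl (fun (st : Bool × List (List Char)) ip =>
        if PySem.Int.mod ip.1 2 = 1 then
          (st.1 || PySem.Chars.isIn [s] ip.2, st.2 ++ [PySem.Chars.replace ip.2 [s] rep])
        else (st.1, st.2 ++ [ip.2])) (m, out)
      = (m || modB s (decide (PySem.Int.mod n 2 = 1)) ps,
         out ++ mapAlt s rep (decide (PySem.Int.mod n 2 = 1)) ps) := by
  intro ps
  induction ps with
  | nil => intro n m out; simp [PySem.List.enumerate, modB, mapAlt]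
  | cons p ps ih =>
    intro n m out
    rw [show PySem.List.enumerate (p :: ps) n = (n, p) :: PySem.List.enumerate ps (n + 1) from rfl,
        List.foldl_cons]
    by_cases hn : PySem.Int.mod n 2 = 1
    · simp only [if_pos hn]
      rw [ih]
      rw [mod2_succ]
      have hd : decide (PySem.Int.mod n 2 = 1) = true := decide_eq_true hn
      rw [hd]
      simp [modB, mapAlt, bodyOf, isIn_singleton, replace_eq, Bool.or_assoc]
    · simp only [if_neg hn]
      rw [ih, mod2_succ]
      have hd : decide (PySem.Int.mod n 2 = 1) = false := decide_eq_false hn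
      rw [hd]
      simp [modB, mapAlt, bodyOf]

-- ===== VERDICT (by name: the statement is the Claim_ definition above) =====
theorem fix_illegal_sep_quotes_spec : Claim_equal_fix_illegal_sep_quotes := by
  intro line sep rep _
  unfold Spec_fix_illegal_sep_quotes fix_illegal_sep_quotes fix_illegal_sep_quotes_alt
  by_cases hl : sep.toList.length = 1
  · rw [if_neg (by simpa using hl)]
    obtain ⟨s, hs⟩ := List.length_eq_one_iff.1 hl
    rw [hs]
    dsimp only
    rw [foldA_spec [s] rep.toList line.toList false false []]
    rw [procA_split s rep.toList line.toList false]
    rw [splitOn_eq]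
    rw [show (PySem.List.enumerate (splitQ line.toList)) = PySem.List.enumerate (splitQ line.toList) 0 from rfl]
    rw [foldB_spec s rep.toList (splitQ line.toList) 0 false []]
    have h0 : decide (PySem.Int.mod 0 2 = 1) = false := by decide
    rw [h0]
    simp only [Bool.false_or, List.nil_append]
    rw [join_mapAlt s rep.toList (splitQ line.toList) false (splitQ_ne_nil _)]
  · rw [if_pos (by simpa using hl)]
    rw [foldA_spec sep.toList rep.toList line.toList false false []]
    rw [procA_of_len_ne_one sep.toList rep.toList hl line.toList false]
    simp [String.ofList_toList]
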